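-- pv_equiv track=rewrite | github.com/jwhitlow45/blackjackSim | blackjack.py | calc_hard_count
-- ===== SOURCE A (Python) =====
-- from typing import List
--
-- def calc_hard_count(hand: List[int]) -> int:
--     """returns hard count (a=1) of given hand
--
--     Args:
--         hand (List[int]): hand card
--
--     Returns:
--         int: hard count of given hand
--     """
--     handCount = 0
--     for card in hand:
--         if card == 11:
--             handCount += 1
--         else:
--             handCount += card
--     return handCount
-- ===== SOURCE B (Python) =====
-- from typing import List
--
-- def calc_hard_count(hand: List[int]) -> int:
--     """returns hard count (a=1) of given hand"""
--     return sum(hand) - 10 * hand.count(11)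
-- ===== Notes on version B (the rewrite author's own statement) =====
-- stated objective: simpler
-- what changed: Replaces the per-card conditional accumulation loop with an aggregate sum plus one arithmetic correction: sum(hand) - 10 * hand.count(11), since each ace (11) counts as 1.
import Mathlib
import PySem

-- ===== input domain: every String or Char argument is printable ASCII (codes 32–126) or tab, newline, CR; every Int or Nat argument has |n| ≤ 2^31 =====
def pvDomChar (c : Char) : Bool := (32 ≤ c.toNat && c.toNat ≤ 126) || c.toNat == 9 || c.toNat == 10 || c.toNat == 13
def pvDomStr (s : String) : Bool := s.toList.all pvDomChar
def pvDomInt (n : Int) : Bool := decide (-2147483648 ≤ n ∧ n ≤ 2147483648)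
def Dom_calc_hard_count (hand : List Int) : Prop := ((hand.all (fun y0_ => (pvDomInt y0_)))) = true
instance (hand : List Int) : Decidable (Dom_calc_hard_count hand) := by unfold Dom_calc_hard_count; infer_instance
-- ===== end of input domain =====

-- B replaces A's per-card conditional accumulation with sum(hand) - 10 * count(11) (simpler decomposition, same cost).

-- ===== PORT A =====
def calc_hard_count (hand : List Int) : Int :=
  hand.foldl (fun handCount card => if card == 11 then handCount + 1 else handCount + card) 0

-- ===== PORT B =====
def calc_hard_count_alt (hand : List Int) : Int :=
  hand.sum - 10 * (PySem.List.count hand 11 : Int)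

-- ===== PRECONDITION & SPEC =====
def Spec_calc_hard_count (hand : List Int) (out : Int) : Prop := out = calc_hard_count_alt hand
instance (hand : List Int) (out : Int) : Decidable (Spec_calc_hard_count hand out) := by unfold Spec_calc_hard_count; infer_instance

-- ===== CLAIM (what is proved, stated in full; the proofs are below) =====
def Claim_equal_calc_hard_count : Prop := ∀ (hand : List Int), Dom_calc_hard_count hand → Spec_calc_hard_count hand (calc_hard_count hand)

-- ===== LEMMAS AND PROOFS =====
theorem calc_hard_count_aux (a : Int) (hand : List Int) :
    hand.foldl (fun handCount card => if card == 11 then handCount + 1 else handCount + card) a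
      = a + hand.sum - 10 * (hand.count 11 : Int) := by
  induction hand generalizing a with
  | nil => simp
  | cons x xs ih =>
    rw [List.foldl_cons, ih]
    rcases eq_or_ne x 11 with h | h
    · subst h
      simp only [beq_self_eq_true, if_true, List.sum_cons, List.count_cons_self]
      push_cast; ring
    · simp only [beq_iff_eq, h, if_false, List.sum_cons, List.count_cons_of_ne h]
      ring

theorem calc_hard_count_eq (hand : List Int) :
    calc_hard_count hand = hand.sum - 10 * (hand.count 11 : Int) := by
  unfold calc_hard_count
  rw [calc_hard_count_aux]; ring

-- ===== VERDICT (by name: the statement is the Claim_ definition above) =====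
theorem calc_hard_count_spec : Claim_equal_calc_hard_count := by
  intro hand _
  unfold Spec_calc_hard_count calc_hard_count_alt
  rw [calc_hard_count_eq]
  simp [PySem.List.count]
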